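-- pv_equiv track=rewrite | github.com/kiku-jw/kiku-dist | kiku_dist/prepare_listing.py | _extract_readme_section
-- ===== SOURCE A (Python) =====
-- def _extract_readme_section(readme: str, section_keyword: str) -> str:
--     """Extract a section from README by keyword."""
--     lines = readme.split("\n")
--     in_section = False
--     section_lines = []
--
--     for line in lines:
--         if line.startswith("##") and section_keyword.lower() in line.lower():
--             in_section = True
--             section_lines.append(line)
--             continue
--
--         if in_section:
--             if line.startswith("##"):
--                 break
--             section_lines.append(line)
--
--     return "\n".join(section_lines)
-- ===== SOURCE B (Python) =====
-- def _extract_readme_section(readme: str, section_keyword: str) -> str: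
--     """Extract a section from README by keyword (find-boundaries-then-slice)."""
--     lines = readme.split("\n")
--     kw = section_keyword.lower()
--     start = next(
--         (i for i, line in enumerate(lines)
--          if line.startswith("##") and kw in line.lower()),
--         None,
--     )
--     if start is None:
--         return ""
--     tail = lines[start + 1:]
--     end = next(
--         (j for j, line in enumerate(tail)
--          if line.startswith("##") and kw not in line.lower()),
--         len(tail),
--     )
--     return "\n".join([lines[start]] + tail[:end])
-- ===== Notes on version B (the rewrite author's own statement) =====
-- stated objective: alternative
-- what changed: Replaced A's single stateful accumulation loop (in_section flag, continue/break) with a locate-boundaries-then-slice decomposition: find the first matching '##' heading, find the end of the section (the next '##' heading not containing the keyword, matching A's keep-collecting behaviour), then slice and join.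
import Mathlib
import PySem

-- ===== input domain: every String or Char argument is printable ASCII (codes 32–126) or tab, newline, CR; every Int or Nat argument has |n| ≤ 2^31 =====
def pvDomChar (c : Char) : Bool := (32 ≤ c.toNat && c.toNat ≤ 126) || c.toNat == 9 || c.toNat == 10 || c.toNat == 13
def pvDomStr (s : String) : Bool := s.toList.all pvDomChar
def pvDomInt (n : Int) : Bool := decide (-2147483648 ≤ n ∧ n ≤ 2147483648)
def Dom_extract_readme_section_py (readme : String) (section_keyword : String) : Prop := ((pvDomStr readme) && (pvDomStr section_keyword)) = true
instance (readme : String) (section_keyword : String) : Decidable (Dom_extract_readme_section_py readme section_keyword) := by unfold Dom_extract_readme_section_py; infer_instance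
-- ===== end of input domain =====

-- B replaces A's single stateful accumulation loop with a find-boundaries-then-slice
-- decomposition (locate the start heading, locate the section end, slice and join); objective: alternative.


-- ===== PORT A =====
-- The two line tests both sources spell out: 'line.startswith("##") and kw in line.lower()'
-- and (for B's end search) its '##'-but-no-keyword counterpart.
def pvIsStart (kw l : String) : Bool :=
  PySem.Str.startswith l "##" && PySem.Str.isIn kw (PySem.Str.lower l)

def pvIsEnd (kw l : String) : Bool :=
  PySem.Str.startswith l "##" && ! PySem.Str.isIn kw (PySem.Str.lower l)

-- A's for-loop with `in_section` flag, `continue` and `break`, as structural recursion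
-- over the same state (flag, accumulated lines).
def pvLoopA (kw : String) : List String → Bool → List String → List String
  | [], _, acc => acc
  | l :: rest, inSec, acc =>
    if pvIsStart kw l then
      pvLoopA kw rest true (acc ++ [l])
    else if inSec then
      if PySem.Str.startswith l "##" then acc
      else pvLoopA kw rest inSec (acc ++ [l])
    else pvLoopA kw rest inSec acc

def extract_readme_section_py (readme : String) (section_keyword : String) : String :=
  let lines := (PySem.Str.split? readme "\n").getD []   -- split? is some: sep "\n" ≠ ""
  PySem.Str.join "\n" (pvLoopA (PySem.Str.lower section_keyword) lines false [])

-- ===== PORT B =====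
def extract_readme_section_py_alt (readme : String) (section_keyword : String) : String :=
  let lines := (PySem.Str.split? readme "\n").getD []   -- split? is some: sep "\n" ≠ ""
  let kw := PySem.Str.lower section_keyword
  match lines.findIdx? (pvIsStart kw) with      -- next((i for i, line in enumerate(lines) …), None)
  | none => ""
  | some s =>
    let tail := PySem.List.slice lines (some ((s : Int) + 1)) none      -- lines[start+1:]
    let e := (tail.findIdx? (pvIsEnd kw)).getD tail.length              -- next(…, len(tail))
    -- lines[start]: index returned by findIdx?, provably in range, so the default "" is never used
    PySem.Str.join "\n" (PySem.List.pyGetD lines (s : Int) "" :: PySem.List.slice tail none (some (e : Int)))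

-- ===== PRECONDITION & SPEC =====
def Spec_extract_readme_section_py (readme : String) (section_keyword : String) (out : String) : Prop := out = extract_readme_section_py_alt readme section_keyword
instance (readme : String) (section_keyword : String) (out : String) : Decidable (Spec_extract_readme_section_py readme section_keyword out) := by unfold Spec_extract_readme_section_py; infer_instance

-- ===== CLAIM (what is proved, stated in full; the proofs are below) =====
def Claim_equal_extract_readme_section_py : Prop := ∀ (readme : String) (section_keyword : String), Dom_extract_readme_section_py readme section_keyword → Spec_extract_readme_section_py readme section_keyword (extract_readme_section_py readme section_keyword)

-- ===== LEMMAS AND PROOFS =====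

-- In-section phase of A: collect until the first line that starts a DIFFERENT section.
theorem pvLoopA_true (kw : String) (ls acc : List String) :
    pvLoopA kw ls true acc = acc ++ ls.takeWhile (fun l => ! pvIsEnd kw l) := by
  induction ls generalizing acc with
  | nil => simp [pvLoopA]
  | cons l rest ih =>
    cases h1 : PySem.Str.startswith l "##" <;>
      cases h2 : PySem.Str.isIn kw (PySem.Str.lower l) <;>
        simp only [pvLoopA, pvIsStart, pvIsEnd, List.takeWhile_cons, h1, h2,
          Bool.true_and, Bool.false_and, Bool.not_true, Bool.not_false,
          Bool.and_true, Bool.and_false, Bool.false_eq_true, if_false, if_true] <;>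
        simp [pvIsEnd, ih]

-- take up to the first index satisfying q  =  takeWhile (! q ·)
theorem pvTake_findIdx? {α : Type} (q : α → Bool) (l : List α) :
    l.take ((l.findIdx? q).getD l.length) = l.takeWhile (fun x => ! q x) := by
  induction l with
  | nil => simp
  | cons x rest ih =>
    cases hq : q x
    · cases h : rest.findIdx? q <;>
        simp [List.findIdx?_cons, hq, h] <;> simpa [h] using ih
    · simp [List.findIdx?_cons, hq]

-- The whole equality at the list level.
theorem pvMain (kw : String) (ls : List String) :
    PySem.Str.join "\n" (pvLoopA kw ls false []) =
      (match ls.findIdx? (pvIsStart kw) with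
       | none => ""
       | some s =>
         let tail := PySem.List.slice ls (some ((s : Int) + 1)) none
         let e := (tail.findIdx? (pvIsEnd kw)).getD tail.length
         PySem.Str.join "\n" (PySem.List.pyGetD ls (s : Int) "" :: PySem.List.slice tail none (some (e : Int)))) := by
  induction ls with
  | nil => rfl
  | cons l rest ih =>
    cases hp : pvIsStart kw l
    · -- not a matching heading: A skips it; B's start index shifts by one
      have hskip : pvLoopA kw (l :: rest) false [] = pvLoopA kw rest false [] := by
        simp [pvLoopA, hp]
      rw [hskip, ih]
      cases hfi : rest.findIdx? (pvIsStart kw) with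
      | none => simp [List.findIdx?_cons, hp, hfi]
      | some s =>
        have hcons : (l :: rest).findIdx? (pvIsStart kw) = some (s + 1) := by
          simp [List.findIdx?_cons, hp, hfi]
        rw [hcons]
        have hc1 : ((s : Int)) + 1 = (((s + 1 : Nat)) : Int) := by push_cast; ring
        have hc2 : (((s + 1 : Nat) : Int)) + 1 = (((s + 2 : Nat)) : Int) := by push_cast; ring
        simp only [hc1, hc2, PySem.List.slice_from_natCast, PySem.List.pyGetD_natCast]
        simp [List.drop_succ_cons]
    · -- first matching heading found here
      have hcons : (l :: rest).findIdx? (pvIsStart kw) = some 0 := by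
        simp [List.findIdx?_cons, hp]
      rw [hcons]
      have hstart : pvLoopA kw (l :: rest) false [] = pvLoopA kw rest true [l] := by
        simp [pvLoopA, hp]
      rw [hstart, pvLoopA_true]
      have h1 : ((0 : Int)) + 1 = ((1 : Nat) : Int) := by norm_num
      simp only [Nat.cast_zero, h1, PySem.List.slice_from_natCast, List.drop_one,
        PySem.List.slice_to_natCast, pvTake_findIdx?]
      simp

-- ===== VERDICT (by name: the statement is the Claim_ definition above) =====
theorem extract_readme_section_py_spec : Claim_equal_extract_readme_section_py := by
  intro readme section_keyword _
  unfold Spec_extract_readme_section_py extract_readme_section_py extract_readme_section_py_alt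
  exact pvMain (PySem.Str.lower section_keyword) ((PySem.Str.split? readme "\n").getD [])
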